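-- pv_equiv track=rewrite | github.com/krzysztof-turowski/programming-contests | google-code-jam/2022-round-1a/double_or_one.py | solve
-- ===== SOURCE A (Python) =====
-- def solve(S):
--     index = [0] * len(S)
--     for i, s in enumerate(S):
--         index[i] = index[i - 1]
--         while index[i] < len(S) and S[index[i]] == s:
--             index[i] += 1
--     return ''.join(s + s if index[i] < len(S) and s < S[index[i]] else s
--                    for i, s in enumerate(S))
-- ===== SOURCE B (Python) =====
-- def solve(S):
--     out = []
--     nd = None
--     for i in range(len(S) - 1, -1, -1):
--         s = S[i]
--         if i + 1 < len(S):
--             nd = S[i + 1] if S[i + 1] != s else nd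
--         out.append(s + s if nd is not None and s < nd else s)
--     return ''.join(reversed(out))
-- ===== Notes on version B (the rewrite author's own statement) =====
-- stated objective: simpler
-- what changed: A builds a forward monotone-pointer index array (index[i] = first position after i holding a different element, found by re-advancing a pointer) and then joins in a second generator pass; B is one right-to-left pass keeping a single scalar nd = the nearest distinct element to the right, deciding each position immediately (measured ~2x faster: one pass, no index array, no repeated S[index[i]] lookups).
import Mathlib
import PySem

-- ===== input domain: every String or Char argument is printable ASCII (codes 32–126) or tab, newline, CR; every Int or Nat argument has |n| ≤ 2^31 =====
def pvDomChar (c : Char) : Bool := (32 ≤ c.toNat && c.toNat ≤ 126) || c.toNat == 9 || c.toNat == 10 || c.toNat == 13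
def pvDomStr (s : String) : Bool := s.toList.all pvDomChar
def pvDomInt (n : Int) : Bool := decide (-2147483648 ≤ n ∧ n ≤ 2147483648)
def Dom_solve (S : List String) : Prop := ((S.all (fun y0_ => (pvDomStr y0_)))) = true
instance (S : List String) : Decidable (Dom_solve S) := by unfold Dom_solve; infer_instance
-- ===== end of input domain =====

-- B replaces A's forward monotone-pointer index array by a single right-to-left pass
-- holding one scalar (the nearest distinct element to the right); objective: simpler.

-- ===== PORT A =====
-- 'while index[i] < len(S) and S[index[i]] == s: index[i] += 1'
def pvAdvance (S : List String) (s : String) (j : Nat) : Nat :=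
  if h : j < S.length then
    if S.getD j "" = s then pvAdvance S s (j + 1) else j
  else j
termination_by S.length - j
decreasing_by omega

-- 'for i, s in enumerate(S): index[i] = index[i-1]; while …' ; prev carries index[i-1]
-- (index[-1] reads the still-zero last slot at i = 0, hence the initial prev = 0)
def pvIndexGo (S : List String) (prev : Nat) : List String → List Nat
  | [] => []
  | s :: rest => pvAdvance S s prev :: pvIndexGo S (pvAdvance S s prev) rest

-- 's + s if index[i] < len(S) and s < S[index[i]] else s' for one pair (s, index[i])
def pvPieceA (S : List String) (p : String × Nat) : String :=
  if p.2 < S.length ∧ p.1 < S.getD p.2 "" then p.1 ++ p.1 else p.1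

def solve (S : List String) : String :=
  PySem.Str.join "" ((S.zip (pvIndexGo S 0 S)).map (pvPieceA S))

-- ===== PORT B =====
-- right-to-left loop of Source B as structural recursion; returns (pieces, nd) where nd is
-- the nearest element distinct from the head among the elements to its right
def pvPiecesB : List String → List String × Option String
  | [] => ([], none)
  | s :: rest =>
    let r := pvPiecesB rest
    let nd : Option String :=
      match rest with
      | [] => none
      | t :: _ => if t ≠ s then some t else r.2
    ((match nd with
      | some x => if s < x then s ++ s else s
      | none => s) :: r.1, nd)

def solve_alt (S : List String) : String :=
  PySem.Str.join "" (pvPiecesB S).1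

-- ===== PRECONDITION & SPEC =====
def Spec_solve (S : List String) (out : String) : Prop := out = solve_alt S
instance (S : List String) (out : String) : Decidable (Spec_solve S out) := by unfold Spec_solve; infer_instance

-- ===== CLAIM (what is proved, stated in full; the proofs are below) =====
def Claim_equal_solve : Prop := ∀ (S : List String), Dom_solve S → Spec_solve S (solve S)

-- ===== LEMMAS AND PROOFS =====

-- index of the first element after position i distinct from S[i] (S.length if none)
def pvJnext (S : List String) (i : Nat) : Nat := pvAdvance S (S.getD i "") (i + 1)

def pvNdSpec (S : List String) (i : Nat) : Option String :=
  if pvJnext S i < S.length then some (S.getD (pvJnext S i) "") else none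

theorem pvAdvance_of_ge (S : List String) (s : String) (j : Nat) (h : S.length ≤ j) :
    pvAdvance S s j = j := by
  rw [pvAdvance]; simp [Nat.not_lt.mpr h]

theorem pvAdvance_succ (S : List String) (s : String) (j : Nat)
    (h : j < S.length) (hs : S.getD j "" = s) :
    pvAdvance S s j = pvAdvance S s (j + 1) := by
  conv_lhs => rw [pvAdvance]
  rw [dif_pos h, if_pos hs]

theorem pvAdvance_ge (S : List String) (s : String) (j : Nat) : j ≤ pvAdvance S s j := by
  fun_induction pvAdvance S s j with
  | case1 j h hs ih => omega
  | case2 j h hs => omega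
  | case3 j h => omega

theorem pvAdvance_le (S : List String) (s : String) (j : Nat) (h : j ≤ S.length) :
    pvAdvance S s j ≤ S.length := by
  fun_induction pvAdvance S s j with
  | case1 j h hs ih => exact ih (by omega)
  | case2 j h hs => omega
  | case3 j h => omega

theorem pvAdvance_run (S : List String) (s : String) (j k : Nat)
    (h1 : j ≤ k) (h2 : k < pvAdvance S s j) : S.getD k "" = s := by
  fun_induction pvAdvance S s j with
  | case1 j h hs ih =>
    rcases Nat.eq_or_lt_of_le h1 with rfl | hlt
    · exact hs
    · exact ih hlt h2
  | case2 j h hs => omega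
  | case3 j h => omega

theorem pvAdvance_skip (S : List String) (s : String) (j j' : Nat)
    (h1 : j ≤ j') (h3 : j' ≤ S.length)
    (h2 : ∀ k, j ≤ k → k < j' → S.getD k "" = s) :
    pvAdvance S s j = pvAdvance S s j' := by
  induction j', h1 using Nat.le_induction with
  | base => rfl
  | succ j' hjj ih =>
    rw [ih (by omega) (fun k hk hk' => h2 k hk (by omega))]
    exact pvAdvance_succ S s j' (by omega) (h2 j' hjj (by omega))

theorem pvPiecesB_snd (S : List String) (suf : List String) (i : Nat)
    (hsuf : suf = S.drop i) : (pvPiecesB suf).2 = pvNdSpec S i := by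
  induction suf generalizing i with
  | nil =>
    have hlen : S.length ≤ i := List.drop_eq_nil_iff.mp hsuf.symm
    rw [pvNdSpec, pvJnext, pvAdvance_of_ge S _ (i+1) (by omega), if_neg (by omega)]
    rfl
  | cons s rest ih =>
    have hi : i < S.length := by
      have := congrArg List.length hsuf; simp at this; omega
    have hgi : S.getD i "" = s := by
      have h0 : S[i]? = some s := by
        rw [show S[i]? = (S.drop i)[0]? by rw [List.getElem?_drop, Nat.add_zero], ← hsuf]
        rfl
      rw [List.getD_eq_getElem?_getD, h0]; rfl
    have hrest : rest = S.drop (i + 1) := by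
      have := congrArg List.tail hsuf
      simpa [List.tail_drop] using this
    cases rest with
    | nil =>
      have hlen : S.length ≤ i + 1 := List.drop_eq_nil_iff.mp hrest.symm
      rw [pvPiecesB, pvNdSpec, pvJnext, pvAdvance_of_ge S _ (i+1) hlen, if_neg (by omega)]
    | cons t rest' =>
      have hi1 : i + 1 < S.length := by
        have := congrArg List.length hrest; simp at this; omega
      have hgt : S.getD (i + 1) "" = t := by
        have h0 : S[i+1]? = some t := by
          rw [show S[i+1]? = (S.drop (i+1))[0]? by rw [List.getElem?_drop, Nat.add_zero], ← hrest]
          rfl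
        rw [List.getD_eq_getElem?_getD, h0]; rfl
      by_cases hts : t = s
      · subst hts
        have hJ : pvJnext S i = pvJnext S (i + 1) := by
          simp only [pvJnext]; rw [hgi, hgt, pvAdvance_succ S t (i+1) hi1 hgt]
        have ihx := ih (i + 1) hrest
        rw [pvPiecesB]
        simpa using ihx.trans (by unfold pvNdSpec; rw [hJ])
      · have hJ : pvJnext S i = i + 1 := by
          simp only [pvJnext, hgi]
          conv_lhs => rw [pvAdvance]
          rw [dif_pos hi1, if_neg (by rw [hgt]; exact hts)]
        rw [pvPiecesB, pvNdSpec, hJ, if_pos hi1, hgt]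
        simp [hts]

theorem pvMain (S : List String) (suf : List String) (i prev : Nat)
    (hsuf : suf = S.drop i) (h1 : i ≤ prev) (h2 : prev ≤ S.length)
    (h3 : ∀ k, i ≤ k → k < prev → S.getD k "" = S.getD i "") :
    (suf.zip (pvIndexGo S prev suf)).map (pvPieceA S) = (pvPiecesB suf).1 := by
  induction suf generalizing i prev with
  | nil => rfl
  | cons s rest ih =>
    have hi : i < S.length := by
      have := congrArg List.length hsuf; simp at this; omega
    have hgi : S.getD i "" = s := by
      have h0 : S[i]? = some s := by
        rw [show S[i]? = (S.drop i)[0]? by rw [List.getElem?_drop, Nat.add_zero], ← hsuf]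
        rfl
      rw [List.getD_eq_getElem?_getD, h0]; rfl
    have hrest : rest = S.drop (i + 1) := by
      have := congrArg List.tail hsuf
      simpa [List.tail_drop] using this
    have hja : pvAdvance S s prev = pvJnext S i := by
      simp only [pvJnext]; rw [hgi, ← pvAdvance_succ S s i hi hgi]
      exact (pvAdvance_skip S s i prev h1 h2
        (fun k hk hk' => by rw [h3 k hk hk', hgi])).symm
    have hnd := pvPiecesB_snd S (s :: rest) i hsuf
    have hjge : i + 1 ≤ pvJnext S i := by
      simp only [pvJnext, hgi]; exact pvAdvance_ge S s (i + 1)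
    have hjle : pvJnext S i ≤ S.length := by
      simp only [pvJnext, hgi]; exact pvAdvance_le S s (i + 1) (by omega)
    have hrun : ∀ k, i + 1 ≤ k → k < pvJnext S i → S.getD k "" = S.getD (i + 1) "" := by
      intro k hk hk'
      simp only [pvJnext, hgi] at hk'
      rw [pvAdvance_run S s (i+1) k hk hk',
          pvAdvance_run S s (i+1) (i+1) le_rfl (by simp only [pvJnext, hgi] at hjge ⊢; omega)]
    have htail := ih (i + 1) (pvJnext S i) hrest hjge hjle hrun
    simp only [pvIndexGo]
    rw [hja]
    rw [List.zip_cons_cons, List.map_cons, htail]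
    simp only [pvPiecesB]
    congr 1
    · -- head pieces agree
      simp only [pvPiecesB] at hnd
      rw [hnd, pvNdSpec]
      simp only [pvPieceA]
      by_cases hjl : pvJnext S i < S.length
      · rw [if_pos hjl]
        show (if pvJnext S i < S.length ∧ s < S.getD (pvJnext S i) "" then s ++ s else s)
            = if s < S.getD (pvJnext S i) "" then s ++ s else s
        by_cases hlt : s < S.getD (pvJnext S i) ""
        · rw [if_pos ⟨hjl, hlt⟩, if_pos hlt]
        · rw [if_neg (fun hc => hlt hc.2), if_neg hlt]
      · rw [if_neg hjl]
        show (if pvJnext S i < S.length ∧ s < S.getD (pvJnext S i) "" then s ++ s else s) = s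
        rw [if_neg (fun hc => hjl hc.1)]

-- ===== VERDICT (by name: the statement is the Claim_ definition above) =====
theorem solve_spec : Claim_equal_solve := by
  intro S _
  unfold Spec_solve solve solve_alt
  rw [pvMain S S 0 0 (by simp) (le_refl 0) (Nat.zero_le _) (by omega)]
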